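-- pv_equiv track=rewrite | github.com/981377660LMT/algorithm-study | 7_graph/bfs求无权图的最短路径/经典题/abc431-E - Reflection on Grid-镜面反射.py | solve
-- ===== SOURCE A (Python) =====
-- from collections import deque
--
-- INF = int(1e18)
--
-- DIR4 = [(-1, 0), (0, 1), (1, 0), (0, -1)]  # 上右下左
--
-- def mirror(c: str, d: int) -> int:
--     if c == "A":
--         return d
--     if c == "B":
--         return 3 - d
--     return d ^ 1
--
-- def solve(H: int, W: int, grid: list[str]) -> int:
--     d = mirror(grid[0][0], 1)
--     dist = [[[INF] * 4 for _ in range(W)] for _ in range(H)]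
--     dist[0][0][d] = 0
--     queue = deque([(0, 0, d)])
--     while queue:
--         r, c, d = queue.popleft()
--         nr, nc = r + DIR4[d][0], c + DIR4[d][1]
--         if 0 <= nr < H and 0 <= nc < W:
--             nd = mirror(grid[nr][nc], d)
--             if dist[nr][nc][nd] > dist[r][c][d]:
--                 dist[nr][nc][nd] = dist[r][c][d]
--                 queue.appendleft((nr, nc, nd))
--         for nd in range(4):
--             if nd == d:
--                 continue
--             if dist[r][c][nd] > dist[r][c][d] + 1:
--                 dist[r][c][nd] = dist[r][c][d] + 1
--                 queue.append((r, c, nd))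
--     return dist[H - 1][W - 1][1]
-- ===== SOURCE B (Python) =====
-- INF = int(1e18)
--
-- DIR4 = [(-1, 0), (0, 1), (1, 0), (0, -1)]  # up right down left
--
--
-- def mirror(c: str, d: int) -> int:
--     if c == "A":
--         return d
--     if c == "B":
--         return 3 - d
--     return d ^ 1
--
--
-- def solve(H: int, W: int, grid: list[str]) -> int:
--     # Bellman-Ford-style value iteration: sweep all states, relaxing the
--     # forward (cost 0) and turn (cost 1) edges, until a full sweep changes nothing.
--     dist = [[[INF] * 4 for _ in range(W)] for _ in range(H)]
--     dist[0][0][mirror(grid[0][0], 1)] = 0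
--     changed = True
--     while changed:
--         changed = False
--         for r in range(H):
--             for c in range(W):
--                 for d in range(4):
--                     base = dist[r][c][d]
--                     nr, nc = r + DIR4[d][0], c + DIR4[d][1]
--                     if 0 <= nr < H and 0 <= nc < W:
--                         nd = mirror(grid[nr][nc], d)
--                         if dist[nr][nc][nd] > base:
--                             dist[nr][nc][nd] = base
--                             changed = True
--                     for nd in range(4):
--                         if nd != d and dist[r][c][nd] > base + 1:
--                             dist[r][c][nd] = base + 1
--                             changed = True
--     return dist[H - 1][W - 1][1]
-- ===== Notes on version B (the rewrite author's own statement) =====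
-- stated objective: alternative
-- what changed: Replaces the deque-driven 0-1 BFS (per-popped-state relaxation with appendleft/append) by queueless Bellman-Ford-style value iteration: full sweeps over all (row,col,dir) states relaxing forward (cost 0) and turn (cost 1) edges until a sweep changes nothing.
import Mathlib
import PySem

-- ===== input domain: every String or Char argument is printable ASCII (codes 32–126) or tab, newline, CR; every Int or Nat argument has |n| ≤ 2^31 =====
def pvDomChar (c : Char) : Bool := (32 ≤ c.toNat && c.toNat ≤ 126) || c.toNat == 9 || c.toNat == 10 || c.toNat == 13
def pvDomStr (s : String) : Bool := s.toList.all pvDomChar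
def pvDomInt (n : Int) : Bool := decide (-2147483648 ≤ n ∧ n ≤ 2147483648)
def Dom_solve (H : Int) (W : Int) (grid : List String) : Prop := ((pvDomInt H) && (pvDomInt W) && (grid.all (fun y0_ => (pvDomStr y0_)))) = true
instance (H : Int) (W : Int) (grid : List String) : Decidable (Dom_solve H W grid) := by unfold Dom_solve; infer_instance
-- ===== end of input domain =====

-- B replaces A's deque-driven 0-1 BFS by queueless Bellman-Ford-style value iteration
-- (full sweeps over all states, relaxing until a sweep changes nothing); objective: alternative.
-- Both ports model the mutable 3-d dist array as a total function Int → Int → Int → Int with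
-- pointwise functional update — exact, since inside Pre_solve every index the Python performs is in range.
-- Each loop carries a Nat fuel that provably exceeds the loop's step count (a totality guard only).

-- ===== shared helpers (constants of the module, used by both programs) =====
def pvINF : Int := 1000000000000000000

def pvDIR4 : List (Int × Int) := [(-1, 0), (0, 1), (1, 0), (0, -1)]

-- DIR4[d] (default never used: both programs only index with d in range(4))
def pvDirv (d : Int) : Int × Int := (PySem.List.pyGet? pvDIR4 d).getD (0, 0)

-- mirror(c, d); Python's d ^ 1 flips the last bit, i.e. d+1 for even d, d-1 for odd d (exact on all ints)
def pvMir (ch : Char) (d : Int) : Int :=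
  if ch = 'A' then d else if ch = 'B' then 3 - d else (if d % 2 = 0 then d + 1 else d - 1)

-- grid[r][c] (default never used inside Pre_solve)
def pvGch (grid : List String) (r c : Int) : Char :=
  ((PySem.List.pyGet? grid r).bind (fun s => PySem.Str.pyGet? s c)).getD ' '

abbrev pvTab := Int → Int → Int → Int

-- dist[r][c][d] = v, as a functional update
def pvSet (T : pvTab) (r c d v : Int) : pvTab :=
  fun r' c' d' => if r' = r ∧ c' = c ∧ d' = d then v else T r' c' d'

-- Σ over all in-range states of dist[r][c][d].toNat (fuel bound for the loops)
def pvSumT (H W : Int) (T : pvTab) : Nat :=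
  ∑ p ∈ Finset.range H.toNat ×ˢ (Finset.range W.toNat ×ˢ Finset.range 4),
    (T (p.1 : Int) (p.2.1 : Int) (p.2.2 : Int)).toNat

-- ===== PORT A ===== (deque 0-1 BFS; popleft = head, appendleft = cons, append = ++ [·])
def pvTurnStepA (r c d : Int) (acc : pvTab × List (Int × Int × Int)) (nd : Int) :
    pvTab × List (Int × Int × Int) :=
  if nd = d then acc
  else if acc.1 r c nd > acc.1 r c d + 1 then
    (pvSet acc.1 r c nd (acc.1 r c d + 1), acc.2 ++ [(r, c, nd)])
  else acc

def solveLoopA (H W : Int) (grid : List String) :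
    Nat → pvTab → List (Int × Int × Int) → pvTab
  | 0, T, _ => T
  | _ + 1, T, [] => T
  | fuel + 1, T, (r, c, d) :: rest =>
    let nr := r + (pvDirv d).1
    let nc := c + (pvDirv d).2
    let acc1 : pvTab × List (Int × Int × Int) :=
      if 0 ≤ nr ∧ nr < H ∧ 0 ≤ nc ∧ nc < W then
        let nd := pvMir (pvGch grid nr nc) d
        if T nr nc nd > T r c d then (pvSet T nr nc nd (T r c d), (nr, nc, nd) :: rest)
        else (T, rest)
      else (T, rest)
    let acc2 := (PySem.List.pyRange 0 4 1).foldl (pvTurnStepA r c d) acc1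
    solveLoopA H W grid fuel acc2.1 acc2.2

def solve (H : Int) (W : Int) (grid : List String) : Int :=
  let d := pvMir (pvGch grid 0 0) 1
  let T0 := pvSet (fun _ _ _ => pvINF) 0 0 d 0
  solveLoopA H W grid (2 * pvSumT H W T0 + 2) T0 [(0, 0, d)] (H - 1) (W - 1) 1

-- ===== PORT B ===== (Bellman-Ford value iteration: sweep all states until no change)
def pvTurnStepB (r c d base : Int) (acc : pvTab × Bool) (nd : Int) : pvTab × Bool :=
  if nd ≠ d ∧ acc.1 r c nd > base + 1 then (pvSet acc.1 r c nd (base + 1), true) else acc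

def sweepStateB (H W : Int) (grid : List String) (r c d : Int) (acc : pvTab × Bool) :
    pvTab × Bool :=
  let base := acc.1 r c d
  let nr := r + (pvDirv d).1
  let nc := c + (pvDirv d).2
  let acc1 : pvTab × Bool :=
    if 0 ≤ nr ∧ nr < H ∧ 0 ≤ nc ∧ nc < W then
      let nd := pvMir (pvGch grid nr nc) d
      if acc.1 nr nc nd > base then (pvSet acc.1 nr nc nd base, true) else acc
    else acc
  (PySem.List.pyRange 0 4 1).foldl (pvTurnStepB r c d base) acc1

def sweepB (H W : Int) (grid : List String) (T : pvTab) : pvTab × Bool :=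
  (PySem.List.pyRange 0 H 1).foldl (fun acc r =>
    (PySem.List.pyRange 0 W 1).foldl (fun acc c =>
      (PySem.List.pyRange 0 4 1).foldl (fun acc d => sweepStateB H W grid r c d acc) acc) acc)
    (T, false)

def solveIterB (H W : Int) (grid : List String) : Nat → pvTab → pvTab
  | 0, T => T
  | fuel + 1, T =>
    let out := sweepB H W grid T
    if out.2 then solveIterB H W grid fuel out.1 else out.1

def solve_alt (H : Int) (W : Int) (grid : List String) : Int :=
  let T0 := pvSet (fun _ _ _ => pvINF) 0 0 (pvMir (pvGch grid 0 0) 1) 0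
  solveIterB H W grid (pvSumT H W T0 + 1) T0 (H - 1) (W - 1) 1

-- ===== PRECONDITION & SPEC =====
-- Pre_solve = exactly the inputs where Python A returns: a nonempty H×W rectangle must be
-- present (every in-range cell is read by the search, so any missing row/short row raises IndexError;
-- H ≤ 0 or W ≤ 0 raises on dist[0][0] / grid[0][0]).
def Pre_solve (H : Int) (W : Int) (grid : List String) : Prop :=
  1 ≤ H ∧ 1 ≤ W ∧ H ≤ (grid.length : Int) ∧
    ∀ s ∈ grid.take H.toNat, W ≤ (s.toList.length : Int)
instance (H : Int) (W : Int) (grid : List String) : Decidable (Pre_solve H W grid) := by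
  unfold Pre_solve; infer_instance

def pvWitness_solve : Int × Int × List String := (2, 2, ["AB", "CA"])

def Spec_solve (H : Int) (W : Int) (grid : List String) (out : Int) : Prop := out = solve_alt H W grid
instance (H : Int) (W : Int) (grid : List String) (out : Int) : Decidable (Spec_solve H W grid out) := by unfold Spec_solve; infer_instance

-- ===== CLAIM (what is proved, stated in full; the proofs are below) =====
def Claim_equal_solve : Prop := ∀ (H : Int) (W : Int) (grid : List String), Dom_solve H W grid → Pre_solve H W grid → Spec_solve H W grid (solve H W grid)

-- ===== LEMMAS AND PROOFS =====

def pvInR (H W r c d : Int) : Prop := 0 ≤ r ∧ r < H ∧ 0 ≤ c ∧ c < W ∧ 0 ≤ d ∧ d < 4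

-- the relaxation system both programs drive to a fixpoint:
-- forward edge (weight 0) and turn edges (weight 1) out of state (r,c,d)
def EdgeSat (H W : Int) (grid : List String) (T : pvTab) (r c d : Int) : Prop :=
  ((0 ≤ r + (pvDirv d).1 ∧ r + (pvDirv d).1 < H ∧ 0 ≤ c + (pvDirv d).2 ∧ c + (pvDirv d).2 < W) →
    T (r + (pvDirv d).1) (c + (pvDirv d).2)
      (pvMir (pvGch grid (r + (pvDirv d).1) (c + (pvDirv d).2)) d) ≤ T r c d) ∧
  (∀ nd, 0 ≤ nd → nd < 4 → T r c nd ≤ T r c d + 1)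

def Stable (H W : Int) (grid : List String) (T : pvTab) : Prop :=
  ∀ r c d, pvInR H W r c d → EdgeSat H W grid T r c d

-- tables reachable from the initial table by guarded relaxations (both loops only do these)
inductive Reach (H W : Int) (grid : List String) : pvTab → Prop
  | init : Reach H W grid (pvSet (fun _ _ _ => pvINF) 0 0 (pvMir (pvGch grid 0 0) 1) 0)
  | fwd {T r c d} (hT : Reach H W grid T) (h : pvInR H W r c d)
      (h1 : 0 ≤ r + (pvDirv d).1) (h2 : r + (pvDirv d).1 < H)
      (h3 : 0 ≤ c + (pvDirv d).2) (h4 : c + (pvDirv d).2 < W)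
      (hgt : T (r + (pvDirv d).1) (c + (pvDirv d).2)
               (pvMir (pvGch grid (r + (pvDirv d).1) (c + (pvDirv d).2)) d) > T r c d) :
      Reach H W grid (pvSet T (r + (pvDirv d).1) (c + (pvDirv d).2)
        (pvMir (pvGch grid (r + (pvDirv d).1) (c + (pvDirv d).2)) d) (T r c d))
  | turn {T r c d nd} (hT : Reach H W grid T) (h : pvInR H W r c d)
      (hnd0 : 0 ≤ nd) (hnd4 : nd < 4) (hgt : T r c nd > T r c d + 1) :
      Reach H W grid (pvSet T r c nd (T r c d + 1))

theorem pvSet_self (T : pvTab) (r c d v : Int) : pvSet T r c d v r c d = v := by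
  simp [pvSet]

theorem pvSet_app (T : pvTab) (r c d v x y z : Int) :
    pvSet T r c d v x y z = if x = r ∧ y = c ∧ z = d then v else T x y z := rfl

theorem pvSet_ne (T : pvTab) (r c d v x y z : Int) (h : ¬(x = r ∧ y = c ∧ z = d)) :
    pvSet T r c d v x y z = T x y z := by
  rw [pvSet_app, if_neg h]

theorem pvSet_le (T : pvTab) (r c d v : Int) (hv : v ≤ T r c d) :
    ∀ x y z, pvSet T r c d v x y z ≤ T x y z := by
  intro x y z
  rw [pvSet_app]
  split
  · next h => obtain ⟨hx, hy, hz⟩ := h; subst hx; subst hy; subst hz; exact hv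
  · exact le_rfl

theorem pvMir_range (ch : Char) (d : Int) (h0 : 0 ≤ d) (h4 : d < 4) :
    0 ≤ pvMir ch d ∧ pvMir ch d < 4 := by
  unfold pvMir; split_ifs <;> omega

theorem pvDirv_nonzero (d : Int) (h0 : 0 ≤ d) (h4 : d < 4) :
    ¬((pvDirv d).1 = 0 ∧ (pvDirv d).2 = 0) := by
  interval_cases d <;> decide

theorem reach_nonneg {H W : Int} {grid : List String} {T : pvTab} (hT : Reach H W grid T) :
    ∀ x y z, 0 ≤ T x y z := by
  induction hT with
  | init =>
    intro x y z; rw [pvSet_app]; split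
    · omega
    · norm_num [pvINF]
  | @fwd T r c d hT h h1 h2 h3 h4 hgt ih =>
    intro x y z; rw [pvSet_app]; split
    · exact ih r c d
    · exact ih x y z
  | @turn T r c d nd hT h hnd0 hnd4 hgt ih =>
    intro x y z; rw [pvSet_app]; split
    · have := ih r c d; omega
    · exact ih x y z

theorem reach_le_INF {H W : Int} {grid : List String} {T : pvTab} (hT : Reach H W grid T) :
    ∀ x y z, T x y z ≤ pvINF := by
  induction hT with
  | init =>
    intro x y z; rw [pvSet_app]; split
    · norm_num [pvINF]
    · exact le_rfl
  | @fwd T r c d hT h h1 h2 h3 h4 hgt ih =>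
    intro x y z; rw [pvSet_app]; split
    · exact ih r c d
    · exact ih x y z
  | @turn T r c d nd hT h hnd0 hnd4 hgt ih =>
    intro x y z; rw [pvSet_app]; split
    · have := ih r c nd; omega
    · exact ih x y z

theorem reach_start {H W : Int} {grid : List String} {T : pvTab} (hT : Reach H W grid T) :
    T 0 0 (pvMir (pvGch grid 0 0) 1) ≤ 0 := by
  induction hT with
  | init =>
    rw [pvSet_app]; split
    · omega
    · next hc => exact absurd ⟨rfl, rfl, rfl⟩ hc
  | @fwd T r c d hT h h1 h2 h3 h4 hgt ih =>
    rw [pvSet_app]; split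
    · next hc =>
      obtain ⟨ha, hb, hc⟩ := hc
      rw [← hc, ← ha, ← hb] at hgt
      omega
    · exact ih
  | @turn T r c d nd hT h hnd0 hnd4 hgt ih =>
    rw [pvSet_app]; split
    · next hc =>
      obtain ⟨ha, hb, hc⟩ := hc
      subst ha; subst hb; subst hc
      omega
    · exact ih

theorem reach_dominate {H W : Int} {grid : List String} (S : pvTab)
    (hS : Stable H W grid S) (hS0 : S 0 0 (pvMir (pvGch grid 0 0) 1) ≤ 0)
    (hSI : ∀ x y z, pvInR H W x y z → S x y z ≤ pvINF) :
    ∀ {T}, Reach H W grid T → ∀ x y z, pvInR H W x y z → S x y z ≤ T x y z := by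
  intro T hT
  induction hT with
  | init =>
    intro x y z hin; rw [pvSet_app]; split
    · next hc => obtain ⟨hx, hy, hz⟩ := hc; subst hx; subst hy; subst hz; exact hS0
    · exact hSI x y z hin
  | @fwd T r c d hT h h1 h2 h3 h4 hgt ih =>
    intro x y z hin; rw [pvSet_app]; split
    · next hc =>
      obtain ⟨hx, hy, hz⟩ := hc; subst hx; subst hy; subst hz
      have hs := (hS r c d h).1 ⟨h1, h2, h3, h4⟩
      have hd := ih r c d h
      omega
    · exact ih x y z hin
  | @turn T r c d nd hT h hnd0 hnd4 hgt ih =>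
    intro x y z hin; rw [pvSet_app]; split
    · next hc =>
      obtain ⟨hx, hy, hz⟩ := hc; rw [hx, hy, hz]
      have hs := (hS r c d h).2 nd hnd0 hnd4
      have hd := ih r c d h
      omega
    · exact ih x y z hin

theorem edgeSat_mono {H W : Int} {grid : List String} {T T' : pvTab} {r c d : Int}
    (hle : ∀ x y z, T' x y z ≤ T x y z) (heq : T' r c d = T r c d)
    (h : EdgeSat H W grid T r c d) : EdgeSat H W grid T' r c d := by
  constructor
  · intro hb
    have h1 := h.1 hb
    have h2 := hle (r + (pvDirv d).1) (c + (pvDirv d).2)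
      (pvMir (pvGch grid (r + (pvDirv d).1) (c + (pvDirv d).2)) d)
    omega
  · intro nd h0 h4
    have h1 := h.2 nd h0 h4
    have h2 := hle r c nd
    omega

theorem pvSumT_lt (H W : Int) {T T' : pvTab} (r c d : Int) (hin : pvInR H W r c d)
    (hnn : 0 ≤ T' r c d) (hlt : T' r c d < T r c d)
    (hle : ∀ x y z, T' x y z ≤ T x y z) :
    pvSumT H W T' < pvSumT H W T := by
  obtain ⟨hr0, hrH, hc0, hcW, hd0, hd4⟩ := hin
  unfold pvSumT
  have hmem : (r.toNat, c.toNat, d.toNat) ∈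
      Finset.range H.toNat ×ˢ (Finset.range W.toNat ×ˢ Finset.range 4) := by
    simp [Finset.mem_product]; omega
  apply Finset.sum_lt_sum (fun p _ => Int.toNat_le_toNat (hle _ _ _))
  refine ⟨(r.toNat, c.toNat, d.toNat), hmem, ?_⟩
  have e1 : ((r.toNat : Int)) = r := Int.toNat_of_nonneg hr0
  have e2 : ((c.toNat : Int)) = c := Int.toNat_of_nonneg hc0
  have e3 : ((d.toNat : Int)) = d := Int.toNat_of_nonneg hd0
  simp only [e1, e2, e3]
  omega

-- ===== A-side loop invariants =====

theorem turnFoldA (H W : Int) (grid : List String) (r c d : Int) (T : pvTab) (N : Nat)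
    (hu : pvInR H W r c d) :
    ∀ (l : List Int), (∀ x ∈ l, 0 ≤ x ∧ x < 4) →
    ∀ (acc : pvTab × List (Int × Int × Int)),
    Reach H W grid acc.1 →
    (∀ s ∈ acc.2, pvInR H W s.1 s.2.1 s.2.2) →
    (∀ x y z : Int, (x, y, z) ∉ acc.2 → acc.1 x y z = T x y z) →
    (∀ x y z, acc.1 x y z ≤ T x y z) →
    acc.1 r c d = T r c d →
    2 * pvSumT H W acc.1 + acc.2.length ≤ N →
    (Reach H W grid (l.foldl (pvTurnStepA r c d) acc).1 ∧
     (∀ s ∈ (l.foldl (pvTurnStepA r c d) acc).2, pvInR H W s.1 s.2.1 s.2.2) ∧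
     (∀ x y z : Int, (x, y, z) ∉ (l.foldl (pvTurnStepA r c d) acc).2 →
        (l.foldl (pvTurnStepA r c d) acc).1 x y z = T x y z) ∧
     (∀ x y z, (l.foldl (pvTurnStepA r c d) acc).1 x y z ≤ T x y z) ∧
     (l.foldl (pvTurnStepA r c d) acc).1 r c d = T r c d ∧
     (∀ s ∈ acc.2, s ∈ (l.foldl (pvTurnStepA r c d) acc).2) ∧
     (∀ x y z, (l.foldl (pvTurnStepA r c d) acc).1 x y z ≤ acc.1 x y z) ∧
     (∀ nd ∈ l, (l.foldl (pvTurnStepA r c d) acc).1 r c nd ≤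
        (l.foldl (pvTurnStepA r c d) acc).1 r c d + 1) ∧
     2 * pvSumT H W (l.foldl (pvTurnStepA r c d) acc).1 +
        (l.foldl (pvTurnStepA r c d) acc).2.length ≤ N) := by
  intro l
  induction l with
  | nil =>
    intro _ acc hR hQ hout hle hrc hN
    simp only [List.foldl_nil]
    exact ⟨hR, hQ, hout, hle, hrc, fun s hs => hs, fun x y z => le_rfl,
      fun nd h => absurd h (List.not_mem_nil), hN⟩
  | cons a l ih =>
    intro hb acc hR hQ hout hle hrc hN
    have ha := hb a (by simp)
    have hbl : ∀ x ∈ l, 0 ≤ x ∧ x < 4 := fun x hx => hb x (by simp [hx])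
    by_cases had : a = d
    · have hstep : pvTurnStepA r c d acc a = acc := by simp [pvTurnStepA, had]
      rw [List.foldl_cons, hstep]
      obtain ⟨C1, C2, C3, C4, C5, C6, C7, C8, C9⟩ := ih hbl acc hR hQ hout hle hrc hN
      refine ⟨C1, C2, C3, C4, C5, C6, C7, ?_, C9⟩
      intro nd hnd
      rcases List.mem_cons.mp hnd with h | h
      · rw [h, had]; omega
      · exact C8 nd h
    · by_cases hg : acc.1 r c a > acc.1 r c d + 1
      · have hstep : pvTurnStepA r c d acc a =
            (pvSet acc.1 r c a (acc.1 r c d + 1), acc.2 ++ [(r, c, a)]) := by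
          simp [pvTurnStepA, had, hg]
        rw [List.foldl_cons, hstep]
        have hinA : pvInR H W r c a := ⟨hu.1, hu.2.1, hu.2.2.1, hu.2.2.2.1, ha.1, ha.2⟩
        have hnn := reach_nonneg hR
        have hR' : Reach H W grid (pvSet acc.1 r c a (acc.1 r c d + 1)) :=
          Reach.turn hR hu ha.1 ha.2 hg
        have hQ' : ∀ s ∈ acc.2 ++ [(r, c, a)], pvInR H W s.1 s.2.1 s.2.2 := by
          intro s hs
          rcases List.mem_append.mp hs with h | h
          · exact hQ s h
          · simp at h; rw [h]; exact hinA
        have hle1 : ∀ x y z, pvSet acc.1 r c a (acc.1 r c d + 1) x y z ≤ acc.1 x y z :=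
          pvSet_le _ _ _ _ _ (le_of_lt hg)
        have hout' : ∀ x y z : Int, (x, y, z) ∉ acc.2 ++ [(r, c, a)] →
            pvSet acc.1 r c a (acc.1 r c d + 1) x y z = T x y z := by
          intro x y z hxyz
          rw [List.mem_append] at hxyz
          push Not at hxyz
          have hne : ¬(x = r ∧ y = c ∧ z = a) := by
            intro ⟨e1, e2, e3⟩
            exact hxyz.2 (by simp [e1, e2, e3])
          rw [pvSet_ne _ _ _ _ _ _ _ _ hne]
          exact hout x y z hxyz.1
        have hle' : ∀ x y z, pvSet acc.1 r c a (acc.1 r c d + 1) x y z ≤ T x y z :=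
          fun x y z => le_trans (hle1 x y z) (hle x y z)
        have hrc' : pvSet acc.1 r c a (acc.1 r c d + 1) r c d = T r c d := by
          rw [pvSet_ne _ _ _ _ _ _ _ _ (fun h => had (h.2.2).symm)]
          exact hrc
        have hsum : pvSumT H W (pvSet acc.1 r c a (acc.1 r c d + 1)) < pvSumT H W acc.1 := by
          apply pvSumT_lt H W r c a hinA
          · rw [pvSet_self]; have := hnn r c d; omega
          · rw [pvSet_self]; omega
          · exact hle1
        have hN' : 2 * pvSumT H W (pvSet acc.1 r c a (acc.1 r c d + 1)) +
            (acc.2 ++ [(r, c, a)]).length ≤ N := by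
          rw [List.length_append]
          simp only [List.length_singleton]
          omega
        obtain ⟨C1, C2, C3, C4, C5, C6, C7, C8, C9⟩ :=
          ih hbl (pvSet acc.1 r c a (acc.1 r c d + 1), acc.2 ++ [(r, c, a)]) hR' hQ' hout' hle' hrc' hN'
        refine ⟨C1, C2, C3, C4, C5, ?_, ?_, ?_, C9⟩
        · intro s hs; exact C6 s (by simp [hs])
        · intro x y z; exact le_trans (C7 x y z) (hle1 x y z)
        · intro nd hnd
          rcases List.mem_cons.mp hnd with h | h
          · have h1 : (List.foldl (pvTurnStepA r c d)
                (pvSet acc.1 r c a (acc.1 r c d + 1), acc.2 ++ [(r, c, a)]) l).1 r c a ≤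
                acc.1 r c d + 1 := by
              have := C7 r c a
              simpa [pvSet] using this
            have h3 := C5
            rw [h]
            omega
          · exact C8 nd h
      · have hstep : pvTurnStepA r c d acc a = acc := by simp [pvTurnStepA, had, hg]
        rw [List.foldl_cons, hstep]
        obtain ⟨C1, C2, C3, C4, C5, C6, C7, C8, C9⟩ := ih hbl acc hR hQ hout hle hrc hN
        refine ⟨C1, C2, C3, C4, C5, C6, C7, ?_, C9⟩
        intro nd hnd
        rcases List.mem_cons.mp hnd with h | h
        · have h1 := C7 r c a
          rw [h]
          omega
        · exact C8 nd h

def stage1A (H W : Int) (grid : List String) (T : pvTab) (r c d : Int)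
    (rest : List (Int × Int × Int)) : pvTab × List (Int × Int × Int) :=
  if 0 ≤ r + (pvDirv d).1 ∧ r + (pvDirv d).1 < H ∧ 0 ≤ c + (pvDirv d).2 ∧ c + (pvDirv d).2 < W then
    if T (r + (pvDirv d).1) (c + (pvDirv d).2)
         (pvMir (pvGch grid (r + (pvDirv d).1) (c + (pvDirv d).2)) d) > T r c d then
      (pvSet T (r + (pvDirv d).1) (c + (pvDirv d).2)
         (pvMir (pvGch grid (r + (pvDirv d).1) (c + (pvDirv d).2)) d) (T r c d),
       (r + (pvDirv d).1, c + (pvDirv d).2,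
         pvMir (pvGch grid (r + (pvDirv d).1) (c + (pvDirv d).2)) d) :: rest)
    else (T, rest)
  else (T, rest)

theorem loopA_nil (H W : Int) (grid : List String) (fuel : Nat) (T : pvTab) :
    solveLoopA H W grid (fuel + 1) T [] = T := rfl

theorem loopA_step (H W : Int) (grid : List String) (fuel : Nat) (T : pvTab)
    (r c d : Int) (rest : List (Int × Int × Int)) :
    solveLoopA H W grid (fuel + 1) T ((r, c, d) :: rest) =
      solveLoopA H W grid fuel
        ((PySem.List.pyRange 0 4 1).foldl (pvTurnStepA r c d) (stage1A H W grid T r c d rest)).1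
        ((PySem.List.pyRange 0 4 1).foldl (pvTurnStepA r c d) (stage1A H W grid T r c d rest)).2 := rfl

theorem stage1A_ok (H W : Int) (grid : List String) (T : pvTab) (r c d : Int)
    (rest : List (Int × Int × Int)) (hu : pvInR H W r c d) (hR : Reach H W grid T)
    (hQrest : ∀ s ∈ rest, pvInR H W s.1 s.2.1 s.2.2) :
    Reach H W grid (stage1A H W grid T r c d rest).1 ∧
    (∀ s ∈ (stage1A H W grid T r c d rest).2, pvInR H W s.1 s.2.1 s.2.2) ∧
    (∀ x y z : Int, (x, y, z) ∉ (stage1A H W grid T r c d rest).2 →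
      (stage1A H W grid T r c d rest).1 x y z = T x y z) ∧
    (∀ x y z, (stage1A H W grid T r c d rest).1 x y z ≤ T x y z) ∧
    (stage1A H W grid T r c d rest).1 r c d = T r c d ∧
    (∀ s ∈ rest, s ∈ (stage1A H W grid T r c d rest).2) ∧
    ((0 ≤ r + (pvDirv d).1 ∧ r + (pvDirv d).1 < H ∧ 0 ≤ c + (pvDirv d).2 ∧ c + (pvDirv d).2 < W) →
      (stage1A H W grid T r c d rest).1 (r + (pvDirv d).1) (c + (pvDirv d).2)
          (pvMir (pvGch grid (r + (pvDirv d).1) (c + (pvDirv d).2)) d) ≤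
        (stage1A H W grid T r c d rest).1 r c d) ∧
    2 * pvSumT H W (stage1A H W grid T r c d rest).1 +
        (stage1A H W grid T r c d rest).2.length ≤ 2 * pvSumT H W T + rest.length := by
  have hnn := reach_nonneg hR
  have hcell : ¬((pvDirv d).1 = 0 ∧ (pvDirv d).2 = 0) :=
    pvDirv_nonzero d hu.2.2.2.2.1 hu.2.2.2.2.2
  unfold stage1A
  split_ifs with hbnd hg
  · -- forward relaxation fires
    have hmr := pvMir_range (pvGch grid (r + (pvDirv d).1) (c + (pvDirv d).2)) d
      hu.2.2.2.2.1 hu.2.2.2.2.2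
    have htin : pvInR H W (r + (pvDirv d).1) (c + (pvDirv d).2)
        (pvMir (pvGch grid (r + (pvDirv d).1) (c + (pvDirv d).2)) d) :=
      ⟨hbnd.1, hbnd.2.1, hbnd.2.2.1, hbnd.2.2.2, hmr.1, hmr.2⟩
    have hne : ¬(r = r + (pvDirv d).1 ∧ c = c + (pvDirv d).2 ∧
        d = pvMir (pvGch grid (r + (pvDirv d).1) (c + (pvDirv d).2)) d) := by
      intro ⟨e1, e2, _⟩
      exact hcell ⟨by omega, by omega⟩
    have hle1 := pvSet_le T (r + (pvDirv d).1) (c + (pvDirv d).2)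
      (pvMir (pvGch grid (r + (pvDirv d).1) (c + (pvDirv d).2)) d) (T r c d) (le_of_lt hg)
    dsimp only
    refine ⟨Reach.fwd hR hu hbnd.1 hbnd.2.1 hbnd.2.2.1 hbnd.2.2.2 hg, ?_, ?_, hle1, ?_, ?_, ?_, ?_⟩
    · intro s hs
      rcases List.mem_cons.mp hs with h | h
      · rw [h]; exact htin
      · exact hQrest s h
    · intro x y z hxyz
      rw [List.mem_cons] at hxyz
      push Not at hxyz
      apply pvSet_ne
      intro ⟨e1, e2, e3⟩
      exact hxyz.1 (by simp [e1, e2, e3])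
    · exact pvSet_ne _ _ _ _ _ _ _ _ hne
    · intro s hs; simp [hs]
    · intro _
      rw [pvSet_self, pvSet_ne _ _ _ _ _ _ _ _ hne]
    · have hsum : pvSumT H W (pvSet T (r + (pvDirv d).1) (c + (pvDirv d).2)
          (pvMir (pvGch grid (r + (pvDirv d).1) (c + (pvDirv d).2)) d) (T r c d)) <
          pvSumT H W T := by
        apply pvSumT_lt H W _ _ _ htin
        · rw [pvSet_self]; exact hnn r c d
        · rw [pvSet_self]; omega
        · exact hle1
      simp only [List.length_cons]
      omega
  · dsimp only
    exact ⟨hR, hQrest, fun _ _ _ _ => rfl, fun _ _ _ => le_rfl, rfl, fun s hs => hs,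
      fun _ => by omega, by omega⟩
  · dsimp only
    exact ⟨hR, hQrest, fun _ _ _ _ => rfl, fun _ _ _ => le_rfl, rfl, fun s hs => hs,
      fun h => absurd h hbnd, by omega⟩

theorem loopA_ok (H W : Int) (grid : List String) :
    ∀ (fuel : Nat) (T : pvTab) (q : List (Int × Int × Int)),
    Reach H W grid T →
    (∀ s ∈ q, pvInR H W s.1 s.2.1 s.2.2) →
    (∀ x y z, pvInR H W x y z → (x, y, z) ∉ q → EdgeSat H W grid T x y z) →
    2 * pvSumT H W T + q.length < fuel →
    Reach H W grid (solveLoopA H W grid fuel T q) ∧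
      Stable H W grid (solveLoopA H W grid fuel T q) := by
  intro fuel
  induction fuel with
  | zero => intro T q _ _ _ hf; exact absurd hf (by omega)
  | succ fuel ih =>
    intro T q hR hQ hQA hf
    cases q with
    | nil =>
      rw [loopA_nil]
      exact ⟨hR, fun r c d hin => hQA r c d hin (by simp)⟩
    | cons s rest =>
      obtain ⟨r, c, d⟩ := s
      have hu : pvInR H W r c d := hQ (r, c, d) (by simp)
      have hQrest : ∀ s ∈ rest, pvInR H W s.1 s.2.1 s.2.2 :=
        fun s hs => hQ s (by simp [hs])
      obtain ⟨S1, S2, S3, S4, S5, S6, S7, S8⟩ := stage1A_ok H W grid T r c d rest hu hR hQrest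
      obtain ⟨C1, C2, C3, C4, C5, C6, C7, C8, C9⟩ :=
        turnFoldA H W grid r c d T (2 * pvSumT H W T + rest.length) hu
          (PySem.List.pyRange 0 4 1)
          (fun x hx => PySem.List.mem_pyRange_one.mp hx)
          (stage1A H W grid T r c d rest) S1 S2 S3 S4 S5 S8
      rw [loopA_step]
      apply ih
      · exact C1
      · exact C2
      · intro x y z hin hnot
        by_cases hx : (x, y, z) = ((r, c, d) : Int × Int × Int)
        · rw [Prod.ext_iff, Prod.ext_iff] at hx
          obtain ⟨e1, e2, e3⟩ := hx
          simp only at e1 e2 e3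
          rw [e1, e2, e3]
          constructor
          · intro hb
            have h1 := C7 (r + (pvDirv d).1) (c + (pvDirv d).2)
              (pvMir (pvGch grid (r + (pvDirv d).1) (c + (pvDirv d).2)) d)
            have h2 := S7 hb
            have h3 := C5
            have h4 := S5
            omega
          · intro nd h0 h4
            exact C8 nd (PySem.List.mem_pyRange_one.mpr ⟨h0, h4⟩)
        · have hxrest : (x, y, z) ∉ rest := by
            intro hmem
            exact hnot (C6 _ (S6 _ hmem))
          have hsat : EdgeSat H W grid T x y z := by
            apply hQA x y z hin
            simp only [List.mem_cons]
            push Not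
            exact ⟨hx, hxrest⟩
          exact edgeSat_mono C4 (C3 x y z hnot) hsat
      · have := hf
        simp only [List.length_cons] at this
        omega

-- ===== B-side loop invariants =====

theorem turnFoldB (H W : Int) (grid : List String) (r c d : Int) (T : pvTab) (ch : Bool)
    (hu : pvInR H W r c d) :
    ∀ (l : List Int), (∀ x ∈ l, 0 ≤ x ∧ x < 4) →
    ∀ (acc : pvTab × Bool),
    Reach H W grid acc.1 →
    (∀ x y z, acc.1 x y z ≤ T x y z) →
    acc.1 r c d = T r c d →
    ((acc.1 = T ∧ acc.2 = ch) ∨ (pvSumT H W acc.1 < pvSumT H W T ∧ acc.2 = true)) →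
    (Reach H W grid (l.foldl (pvTurnStepB r c d (T r c d)) acc).1 ∧
     (∀ x y z, (l.foldl (pvTurnStepB r c d (T r c d)) acc).1 x y z ≤ T x y z) ∧
     (l.foldl (pvTurnStepB r c d (T r c d)) acc).1 r c d = T r c d ∧
     (((l.foldl (pvTurnStepB r c d (T r c d)) acc).1 = T ∧
       (l.foldl (pvTurnStepB r c d (T r c d)) acc).2 = ch ∧
       (acc.1 = T ∧ acc.2 = ch) ∧
       (∀ nd ∈ l, T r c nd ≤ T r c d + 1)) ∨
      (pvSumT H W (l.foldl (pvTurnStepB r c d (T r c d)) acc).1 < pvSumT H W T ∧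
       (l.foldl (pvTurnStepB r c d (T r c d)) acc).2 = true))) := by
  intro l
  induction l with
  | nil =>
    intro _ acc hR hle hrc hdisj
    simp only [List.foldl_nil]
    refine ⟨hR, hle, hrc, ?_⟩
    rcases hdisj with ⟨e1, e2⟩ | h
    · exact Or.inl ⟨e1, e2, ⟨e1, e2⟩, fun nd h => absurd h (List.not_mem_nil)⟩
    · exact Or.inr h
  | cons a l ih =>
    intro hb acc hR hle hrc hdisj
    have ha := hb a (by simp)
    have hbl : ∀ x ∈ l, 0 ≤ x ∧ x < 4 := fun x hx => hb x (by simp [hx])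
    by_cases hg : a ≠ d ∧ acc.1 r c a > T r c d + 1
    · have hstep : pvTurnStepB r c d (T r c d) acc a =
          (pvSet acc.1 r c a (T r c d + 1), true) := by
        unfold pvTurnStepB; rw [if_pos hg]
      rw [List.foldl_cons, hstep]
      have hnn := reach_nonneg hR
      have hgt' : acc.1 r c a > acc.1 r c d + 1 := by rw [hrc]; exact hg.2
      have hR' : Reach H W grid (pvSet acc.1 r c a (T r c d + 1)) := by
        have h0 := Reach.turn hR hu ha.1 ha.2 hgt'
        rw [hrc] at h0
        exact h0
      have hle1 : ∀ x y z, pvSet acc.1 r c a (T r c d + 1) x y z ≤ acc.1 x y z := by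
        apply pvSet_le; omega
      have hle' : ∀ x y z, pvSet acc.1 r c a (T r c d + 1) x y z ≤ T x y z :=
        fun x y z => le_trans (hle1 x y z) (hle x y z)
      have hrc' : pvSet acc.1 r c a (T r c d + 1) r c d = T r c d := by
        rw [pvSet_ne _ _ _ _ _ _ _ _ (fun h => hg.1 (h.2.2).symm)]
        exact hrc
      have hinA : pvInR H W r c a := ⟨hu.1, hu.2.1, hu.2.2.1, hu.2.2.2.1, ha.1, ha.2⟩
      have hsum : pvSumT H W (pvSet acc.1 r c a (T r c d + 1)) < pvSumT H W T := by
        apply pvSumT_lt H W r c a hinA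
        · rw [pvSet_self]; have := hnn r c d; omega
        · rw [pvSet_self]; have := hle r c a; omega
        · exact hle'
      obtain ⟨C1, C2, C3, C4⟩ := ih hbl (pvSet acc.1 r c a (T r c d + 1), true) hR' hle' hrc'
        (Or.inr ⟨hsum, rfl⟩)
      refine ⟨C1, C2, C3, ?_⟩
      rcases C4 with ⟨_, _, ⟨a1, _⟩, _⟩ | h
      · dsimp only at a1; rw [a1] at hsum; exact absurd hsum (lt_irrefl _)
      · exact Or.inr h
    · have hstep : pvTurnStepB r c d (T r c d) acc a = acc := by
        unfold pvTurnStepB; rw [if_neg hg]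
      rw [List.foldl_cons, hstep]
      obtain ⟨C1, C2, C3, C4⟩ := ih hbl acc hR hle hrc hdisj
      refine ⟨C1, C2, C3, ?_⟩
      rcases C4 with ⟨o1, o2, ⟨a1, a2⟩, osat⟩ | h
      · refine Or.inl ⟨o1, o2, ⟨a1, a2⟩, ?_⟩
        intro nd hnd
        rcases List.mem_cons.mp hnd with h | h
        · rw [h]
          by_cases had : a = d
          · rw [had]; omega
          · have hb2 : ¬(acc.1 r c a > T r c d + 1) := fun hB => hg ⟨had, hB⟩
            rw [a1] at hb2
            omega
        · exact osat nd h
      · exact Or.inr h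

theorem sweepStateB_spec (H W : Int) (grid : List String) (r c d : Int) (T : pvTab) (ch : Bool)
    (hu : pvInR H W r c d) (hT : Reach H W grid T) :
    Reach H W grid (sweepStateB H W grid r c d (T, ch)).1 ∧
    (∀ x y z, (sweepStateB H W grid r c d (T, ch)).1 x y z ≤ T x y z) ∧
    (((sweepStateB H W grid r c d (T, ch)).1 = T ∧
      (sweepStateB H W grid r c d (T, ch)).2 = ch ∧ EdgeSat H W grid T r c d) ∨
     (pvSumT H W (sweepStateB H W grid r c d (T, ch)).1 < pvSumT H W T ∧
      (sweepStateB H W grid r c d (T, ch)).2 = true)) := by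
  have hpy : ∀ x ∈ PySem.List.pyRange 0 4 1, 0 ≤ x ∧ x < 4 :=
    fun x hx => PySem.List.mem_pyRange_one.mp hx
  have hcell : ¬((pvDirv d).1 = 0 ∧ (pvDirv d).2 = 0) :=
    pvDirv_nonzero d hu.2.2.2.2.1 hu.2.2.2.2.2
  by_cases hbnd : 0 ≤ r + (pvDirv d).1 ∧ r + (pvDirv d).1 < H ∧
      0 ≤ c + (pvDirv d).2 ∧ c + (pvDirv d).2 < W
  · by_cases hg : T (r + (pvDirv d).1) (c + (pvDirv d).2)
        (pvMir (pvGch grid (r + (pvDirv d).1) (c + (pvDirv d).2)) d) > T r c d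
    · have hEq : sweepStateB H W grid r c d (T, ch) =
          (PySem.List.pyRange 0 4 1).foldl (pvTurnStepB r c d (T r c d))
            (pvSet T (r + (pvDirv d).1) (c + (pvDirv d).2)
              (pvMir (pvGch grid (r + (pvDirv d).1) (c + (pvDirv d).2)) d) (T r c d), true) := by
        unfold sweepStateB; dsimp only; rw [if_pos hbnd, if_pos hg]
      rw [hEq]
      have hmr := pvMir_range (pvGch grid (r + (pvDirv d).1) (c + (pvDirv d).2)) d
        hu.2.2.2.2.1 hu.2.2.2.2.2
      have htin : pvInR H W (r + (pvDirv d).1) (c + (pvDirv d).2)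
          (pvMir (pvGch grid (r + (pvDirv d).1) (c + (pvDirv d).2)) d) :=
        ⟨hbnd.1, hbnd.2.1, hbnd.2.2.1, hbnd.2.2.2, hmr.1, hmr.2⟩
      have hne : ¬(r = r + (pvDirv d).1 ∧ c = c + (pvDirv d).2 ∧
          d = pvMir (pvGch grid (r + (pvDirv d).1) (c + (pvDirv d).2)) d) := by
        intro ⟨e1, e2, _⟩
        exact hcell ⟨by omega, by omega⟩
      have hle1 := pvSet_le T (r + (pvDirv d).1) (c + (pvDirv d).2)
        (pvMir (pvGch grid (r + (pvDirv d).1) (c + (pvDirv d).2)) d) (T r c d) (le_of_lt hg)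
      have hnn := reach_nonneg hT
      have hsum : pvSumT H W (pvSet T (r + (pvDirv d).1) (c + (pvDirv d).2)
          (pvMir (pvGch grid (r + (pvDirv d).1) (c + (pvDirv d).2)) d) (T r c d)) <
          pvSumT H W T := by
        apply pvSumT_lt H W _ _ _ htin
        · rw [pvSet_self]; exact hnn r c d
        · rw [pvSet_self]; omega
        · exact hle1
      obtain ⟨C1, C2, C3, C4⟩ := turnFoldB H W grid r c d T true hu
        (PySem.List.pyRange 0 4 1) hpy
        (pvSet T (r + (pvDirv d).1) (c + (pvDirv d).2)
          (pvMir (pvGch grid (r + (pvDirv d).1) (c + (pvDirv d).2)) d) (T r c d), true)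
        (Reach.fwd hT hu hbnd.1 hbnd.2.1 hbnd.2.2.1 hbnd.2.2.2 hg)
        hle1 (by dsimp only; rw [pvSet_ne _ _ _ _ _ _ _ _ hne]) (Or.inr ⟨hsum, rfl⟩)
      refine ⟨C1, C2, ?_⟩
      rcases C4 with ⟨_, _, ⟨a1, _⟩, _⟩ | h
      · dsimp only at a1; rw [a1] at hsum; exact absurd hsum (lt_irrefl _)
      · exact Or.inr h
    · have hEq : sweepStateB H W grid r c d (T, ch) =
          (PySem.List.pyRange 0 4 1).foldl (pvTurnStepB r c d (T r c d)) (T, ch) := by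
        unfold sweepStateB; dsimp only; rw [if_pos hbnd, if_neg hg]
      rw [hEq]
      obtain ⟨C1, C2, C3, C4⟩ := turnFoldB H W grid r c d T ch hu
        (PySem.List.pyRange 0 4 1) hpy (T, ch) hT (fun _ _ _ => le_rfl) rfl (Or.inl ⟨rfl, rfl⟩)
      refine ⟨C1, C2, ?_⟩
      rcases C4 with ⟨o1, o2, _, osat⟩ | h
      · refine Or.inl ⟨o1, o2, ⟨fun _ => by omega, ?_⟩⟩
        intro nd h0 h4
        exact osat nd (PySem.List.mem_pyRange_one.mpr ⟨h0, h4⟩)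
      · exact Or.inr h
  · have hEq : sweepStateB H W grid r c d (T, ch) =
        (PySem.List.pyRange 0 4 1).foldl (pvTurnStepB r c d (T r c d)) (T, ch) := by
      unfold sweepStateB; dsimp only; rw [if_neg hbnd]
    rw [hEq]
    obtain ⟨C1, C2, C3, C4⟩ := turnFoldB H W grid r c d T ch hu
      (PySem.List.pyRange 0 4 1) hpy (T, ch) hT (fun _ _ _ => le_rfl) rfl (Or.inl ⟨rfl, rfl⟩)
    refine ⟨C1, C2, ?_⟩
    rcases C4 with ⟨o1, o2, _, osat⟩ | h
    · refine Or.inl ⟨o1, o2, ⟨fun hb => absurd hb hbnd, ?_⟩⟩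
      intro nd h0 h4
      exact osat nd (PySem.List.mem_pyRange_one.mpr ⟨h0, h4⟩)
    · exact Or.inr h

def pvStates (H W : Int) : List (Int × Int × Int) :=
  (PySem.List.pyRange 0 H 1).flatMap fun r =>
    (PySem.List.pyRange 0 W 1).flatMap fun c =>
      (PySem.List.pyRange 0 4 1).map fun d => (r, c, d)

theorem mem_pvStates {H W r c d : Int} :
    (r, c, d) ∈ pvStates H W ↔ pvInR H W r c d := by
  simp [pvStates, pvInR, PySem.List.mem_pyRange_one]
  omega

theorem pvFoldlFlatMap {A B C : Type} (l : List A) (f : A → List B) (g : C → B → C)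
    (init : C) :
    (l.flatMap f).foldl g init = l.foldl (fun acc a => (f a).foldl g acc) init := by
  induction l generalizing init with
  | nil => rfl
  | cons a l ih => simp [List.foldl_append, ih]

theorem sweepB_eq (H W : Int) (grid : List String) (T : pvTab) :
    sweepB H W grid T =
      (pvStates H W).foldl (fun acc s => sweepStateB H W grid s.1 s.2.1 s.2.2 acc) (T, false) := by
  simp only [sweepB, pvStates, pvFoldlFlatMap, List.foldl_map]

theorem sweepListB (H W : Int) (grid : List String) :
    ∀ (ls : List (Int × Int × Int)), (∀ s ∈ ls, pvInR H W s.1 s.2.1 s.2.2) →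
    ∀ (T : pvTab) (ch : Bool), Reach H W grid T →
    (Reach H W grid (ls.foldl (fun acc s => sweepStateB H W grid s.1 s.2.1 s.2.2 acc) (T, ch)).1 ∧
     (∀ x y z, (ls.foldl (fun acc s => sweepStateB H W grid s.1 s.2.1 s.2.2 acc) (T, ch)).1 x y z ≤ T x y z) ∧
     (((ls.foldl (fun acc s => sweepStateB H W grid s.1 s.2.1 s.2.2 acc) (T, ch)).1 = T ∧
       (ls.foldl (fun acc s => sweepStateB H W grid s.1 s.2.1 s.2.2 acc) (T, ch)).2 = ch ∧
       (∀ s ∈ ls, EdgeSat H W grid T s.1 s.2.1 s.2.2)) ∨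
      (pvSumT H W (ls.foldl (fun acc s => sweepStateB H W grid s.1 s.2.1 s.2.2 acc) (T, ch)).1 <
         pvSumT H W T ∧
       (ls.foldl (fun acc s => sweepStateB H W grid s.1 s.2.1 s.2.2 acc) (T, ch)).2 = true))) := by
  intro ls
  induction ls with
  | nil =>
    intro _ T ch hT
    simp only [List.foldl_nil]
    refine ⟨hT, fun _ _ _ => le_rfl, Or.inl ?_⟩
    simp
  | cons s ls ih =>
    intro hin T ch hT
    have hs := hin s (by simp)
    have hin' : ∀ x ∈ ls, pvInR H W x.1 x.2.1 x.2.2 := fun x hx => hin x (by simp [hx])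
    rw [List.foldl_cons]
    obtain ⟨B1, B2, B3⟩ := sweepStateB_spec H W grid s.1 s.2.1 s.2.2 T ch hs hT
    rcases B3 with ⟨e1, e2, esat⟩ | ⟨hsum, e2⟩
    · have ePair : sweepStateB H W grid s.1 s.2.1 s.2.2 (T, ch) = (T, ch) := Prod.ext e1 e2
      rw [ePair]
      obtain ⟨C1, C2, C3⟩ := ih hin' T ch hT
      refine ⟨C1, C2, ?_⟩
      rcases C3 with ⟨o1, o2, osat⟩ | h
      · refine Or.inl ⟨o1, o2, ?_⟩
        intro x hx
        rcases List.mem_cons.mp hx with h | h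
        · rw [h]; exact esat
        · exact osat x h
      · exact Or.inr h
    · have ePair : sweepStateB H W grid s.1 s.2.1 s.2.2 (T, ch) =
          ((sweepStateB H W grid s.1 s.2.1 s.2.2 (T, ch)).1, true) := Prod.ext rfl e2
      rw [ePair]
      obtain ⟨C1, C2, C3⟩ := ih hin' (sweepStateB H W grid s.1 s.2.1 s.2.2 (T, ch)).1 true B1
      refine ⟨C1, fun x y z => le_trans (C2 x y z) (B2 x y z), ?_⟩
      rcases C3 with ⟨o1, o2, _⟩ | ⟨h1, h2⟩
      · refine Or.inr ⟨?_, o2⟩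
        rw [o1]; exact hsum
      · exact Or.inr ⟨lt_trans h1 hsum, h2⟩

theorem loopB_ok (H W : Int) (grid : List String) :
    ∀ (fuel : Nat) (T : pvTab), Reach H W grid T → pvSumT H W T < fuel →
    Reach H W grid (solveIterB H W grid fuel T) ∧
      Stable H W grid (solveIterB H W grid fuel T) := by
  intro fuel
  induction fuel with
  | zero => intro T _ hf; exact absurd hf (by omega)
  | succ fuel ih =>
    intro T hT hf
    have hstates : ∀ s ∈ pvStates H W, pvInR H W s.1 s.2.1 s.2.2 := by
      intro s hsm
      obtain ⟨a, b, c2⟩ := s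
      exact mem_pvStates.mp hsm
    obtain ⟨C1, C2, C3⟩ := sweepListB H W grid (pvStates H W) hstates T false hT
    rw [← sweepB_eq] at C1 C2 C3
    have hstep : solveIterB H W grid (fuel + 1) T =
        if (sweepB H W grid T).2 then solveIterB H W grid fuel (sweepB H W grid T).1
        else (sweepB H W grid T).1 := rfl
    rw [hstep]
    rcases C3 with ⟨o1, o2, osat⟩ | ⟨hsum, o2⟩
    · rw [o2]
      simp only [Bool.false_eq_true, if_false]
      rw [o1]
      refine ⟨hT, ?_⟩
      intro r c d hin
      exact osat (r, c, d) (mem_pvStates.mpr hin)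
    · rw [o2]
      simp only [if_true]
      exact ih (sweepB H W grid T).1 C1 (by omega)

-- ===== VERDICT (by name: the statement is the Claim_ definition above) =====
theorem solve_spec : Claim_equal_solve := by
  unfold Claim_equal_solve
  intro H W grid _ hpre
  unfold Spec_solve
  obtain ⟨h1, h2, _, _⟩ := hpre
  have hd0r : 0 ≤ pvMir (pvGch grid 0 0) 1 ∧ pvMir (pvGch grid 0 0) 1 < 4 :=
    pvMir_range _ _ (by omega) (by omega)
  have hR0 : Reach H W grid (pvSet (fun _ _ _ => pvINF) 0 0 (pvMir (pvGch grid 0 0) 1) 0) :=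
    Reach.init
  have hT0le := reach_le_INF hR0
  have hA := loopA_ok H W grid
    (2 * pvSumT H W (pvSet (fun _ _ _ => pvINF) 0 0 (pvMir (pvGch grid 0 0) 1) 0) + 2)
    (pvSet (fun _ _ _ => pvINF) 0 0 (pvMir (pvGch grid 0 0) 1) 0)
    [(0, 0, pvMir (pvGch grid 0 0) 1)] hR0
    (by
      intro s hsm
      simp only [List.mem_singleton] at hsm
      subst hsm
      dsimp only
      exact ⟨by omega, by omega, by omega, by omega, hd0r.1, hd0r.2⟩)
    (by
      intro x y z hin hnot
      simp only [List.mem_singleton] at hnot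
      have hne : ¬(x = 0 ∧ y = 0 ∧ z = pvMir (pvGch grid 0 0) 1) := by
        intro ⟨e1, e2, e3⟩
        exact hnot (by rw [e1, e2, e3])
      have hx : pvSet (fun _ _ _ => pvINF) 0 0 (pvMir (pvGch grid 0 0) 1) 0 x y z = pvINF :=
        pvSet_ne _ _ _ _ _ _ _ _ hne
      constructor
      · intro _
        rw [hx]
        exact hT0le _ _ _
      · intro nd _ _
        rw [hx]
        have := hT0le x y nd
        omega)
    (by simp only [List.length_singleton]; omega)
  have hB := loopB_ok H W grid
    (pvSumT H W (pvSet (fun _ _ _ => pvINF) 0 0 (pvMir (pvGch grid 0 0) 1) 0) + 1)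
    (pvSet (fun _ _ _ => pvINF) 0 0 (pvMir (pvGch grid 0 0) 1) 0) hR0 (by omega)
  have hin : pvInR H W (H - 1) (W - 1) 1 :=
    ⟨by omega, by omega, by omega, by omega, by omega, by omega⟩
  show solveLoopA H W grid
      (2 * pvSumT H W (pvSet (fun _ _ _ => pvINF) 0 0 (pvMir (pvGch grid 0 0) 1) 0) + 2)
      (pvSet (fun _ _ _ => pvINF) 0 0 (pvMir (pvGch grid 0 0) 1) 0)
      [(0, 0, pvMir (pvGch grid 0 0) 1)] (H - 1) (W - 1) 1 =
    solveIterB H W grid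
      (pvSumT H W (pvSet (fun _ _ _ => pvINF) 0 0 (pvMir (pvGch grid 0 0) 1) 0) + 1)
      (pvSet (fun _ _ _ => pvINF) 0 0 (pvMir (pvGch grid 0 0) 1) 0) (H - 1) (W - 1) 1
  apply le_antisymm
  · exact reach_dominate _ hA.2 (reach_start hA.1)
      (fun x y z _ => reach_le_INF hA.1 x y z) hB.1 (H - 1) (W - 1) 1 hin
  · exact reach_dominate _ hB.2 (reach_start hB.1)
      (fun x y z _ => reach_le_INF hB.1 x y z) hA.1 (H - 1) (W - 1) 1 hin
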